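-- pv_equiv track=rewrite | github.com/kimhaewon1/DLIP_Final | DLIP_Project_GaitAnalysis_2023.py | find_indexes_repeated
-- ===== SOURCE A (Python) =====
-- def find_indexes(lst,ground):
--     index = 0
--     while index < len(lst):
--         if lst[index] > ground:
--             return index
--         index += 1
--
-- def find_flag_index(lst, ground ,start_index):
--     index = start_index + 1
--     while index < len(lst):
--         if lst[index] < ground - 10:
--             return index
--         index += 1
--
-- def find_indexes_repeated(lst, ground):
--     result = []
--     index = find_indexes(lst,ground)
--     while index is not None:
--         result.append(index)
--         flag_index = find_flag_index(lst,ground ,index)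
--         if flag_index is None:
--             break
--         index = find_indexes(lst[flag_index+1:],ground)
--         if index is not None:
--             index += flag_index + 1
--     return result
-- ===== SOURCE B (Python) =====
-- def find_indexes_repeated(lst, ground):
--     result = []
--     seeking_rise = True
--     for i, x in enumerate(lst):
--         if seeking_rise:
--             if x > ground:
--                 result.append(i)
--                 seeking_rise = False
--         else:
--             if x < ground - 10:
--                 seeking_rise = True
--     return result
-- ===== Notes on version B (the rewrite author's own statement) =====
-- stated objective: faster
-- what changed: Replaced A's restart-and-slice search (repeated helper scans plus lst[flag_index+1:] copies) by one linear pass with a two-state machine (seeking rise / seeking fall) that appends indices as it goes.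
import Mathlib
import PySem

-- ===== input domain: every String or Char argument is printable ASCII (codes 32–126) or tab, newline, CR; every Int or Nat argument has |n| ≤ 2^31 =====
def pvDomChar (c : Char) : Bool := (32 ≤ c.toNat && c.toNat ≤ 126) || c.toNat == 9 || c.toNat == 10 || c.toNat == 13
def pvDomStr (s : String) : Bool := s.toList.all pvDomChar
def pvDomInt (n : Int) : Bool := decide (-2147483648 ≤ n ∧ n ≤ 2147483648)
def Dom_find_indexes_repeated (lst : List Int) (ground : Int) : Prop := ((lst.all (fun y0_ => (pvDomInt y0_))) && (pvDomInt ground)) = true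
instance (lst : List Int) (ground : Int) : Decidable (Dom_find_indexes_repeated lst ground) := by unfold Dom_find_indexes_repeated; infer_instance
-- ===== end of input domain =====

-- B replaces A's restart-and-slice search (helper rescans + lst[flag_index+1:] copies) by one
-- linear two-state pass over enumerate(lst); objective: faster.

-- ===== PORT A =====
-- Python find_indexes: while-loop over indices, first index with lst[index] > ground.
-- The while loop is ported with a fuel parameter (lst.length steps always suffice);
-- fuel only makes the same computation total.
def findIndexesAux (lst : List Int) (ground : Int) : Nat → Nat → Option Nat
  | 0, _ => none
  | fuel + 1, index =>
    if h : index < lst.length then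
      if lst[index] > ground then some index
      else findIndexesAux lst ground fuel (index + 1)
    else none

def find_indexes (lst : List Int) (ground : Int) : Option Nat :=
  findIndexesAux lst ground lst.length 0

-- Python find_flag_index: while-loop from start_index+1, first index with lst[index] < ground-10
def findFlagAux (lst : List Int) (ground : Int) : Nat → Nat → Option Nat
  | 0, _ => none
  | fuel + 1, index =>
    if h : index < lst.length then
      if lst[index] < ground - 10 then some index
      else findFlagAux lst ground fuel (index + 1)
    else none

def find_flag_index (lst : List Int) (ground : Int) (start_index : Nat) : Option Nat :=
  findFlagAux lst ground lst.length (start_index + 1)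

-- Python's outer while loop (result.append becomes cons; lst[flag_index+1:] with a
-- nonnegative start is exactly List.drop; fuel lst.length always suffices because the
-- current index strictly increases and stays below lst.length)
def outerLoopA (lst : List Int) (ground : Int) : Nat → Nat → List Int
  | 0, index => [(index : Int)]   -- never reached with the fuel find_indexes_repeated supplies
  | fuel + 1, index =>
    (index : Int) ::
      (match find_flag_index lst ground index with
       | none => []
       | some flag =>
         match find_indexes (lst.drop (flag + 1)) ground with
         | none => []
         | some i => outerLoopA lst ground fuel (i + flag + 1))

def find_indexes_repeated (lst : List Int) (ground : Int) : List Int :=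
  match find_indexes lst ground with
  | none => []
  | some index => outerLoopA lst ground lst.length index

-- ===== PORT B =====
def stepB (ground : Int) (s : List Int × Bool) (p : Int × Int) : List Int × Bool :=
  if s.2 then
    if p.2 > ground then (s.1 ++ [p.1], false) else s
  else
    if p.2 < ground - 10 then (s.1, true) else s

def find_indexes_repeated_alt (lst : List Int) (ground : Int) : List Int :=
  ((PySem.List.enumerate lst).foldl (stepB ground) ([], true)).1

-- ===== PRECONDITION & SPEC =====
def Spec_find_indexes_repeated (lst : List Int) (ground : Int) (out : List Int) : Prop := out = find_indexes_repeated_alt lst ground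
instance (lst : List Int) (ground : Int) (out : List Int) : Decidable (Spec_find_indexes_repeated lst ground out) := by unfold Spec_find_indexes_repeated; infer_instance

-- ===== CLAIM (what is proved, stated in full; the proofs are below) =====
def Claim_equal_find_indexes_repeated : Prop := ∀ (lst : List Int) (ground : Int), Dom_find_indexes_repeated lst ground → Spec_find_indexes_repeated lst ground (find_indexes_repeated lst ground)

-- ===== LEMMAS AND PROOFS =====

-- the pure two-state machine both programs compute
def mach (g : Int) : List Int → Int → Bool → List Int
  | [], _, _ => []
  | x :: xs, i, true => if x > g then i :: mach g xs (i + 1) false else mach g xs (i + 1) true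
  | x :: xs, i, false => if x < g - 10 then mach g xs (i + 1) true else mach g xs (i + 1) false

-- B's fold equals the machine
theorem foldB_eq_mach (g : Int) (xs : List Int) :
    ∀ (i : Int) (acc : List Int) (b : Bool),
      ((PySem.List.enumerate xs i).foldl (stepB g) (acc, b)).1 = acc ++ mach g xs i b := by
  induction xs with
  | nil => intro i acc b; simp [PySem.List.enumerate, mach]
  | cons x xs ih =>
    intro i acc b
    rw [PySem.List.enumerate_cons]
    cases b <;> simp only [List.foldl_cons, stepB, mach] <;> split_ifs <;> simp_all

-- what a successful inner search means
theorem findIndexesAux_some (lst : List Int) (g : Int) :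
    ∀ (fuel k i : Nat), findIndexesAux lst g fuel k = some i →
      k ≤ i ∧ ∃ (h : i < lst.length), lst[i] > g := by
  intro fuel
  induction fuel with
  | zero => intro k i h; cases h
  | succ fuel ih =>
    intro k i h
    rw [findIndexesAux] at h
    by_cases hlt : k < lst.length
    · rw [dif_pos hlt] at h
      by_cases hx : lst[k] > g
      · rw [if_pos hx] at h; cases h; exact ⟨le_refl _, hlt, hx⟩
      · rw [if_neg hx] at h
        obtain ⟨h1, h2⟩ := ih (k + 1) i h
        exact ⟨by omega, h2⟩
    · rw [dif_neg hlt] at h; cases h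

theorem findFlagAux_some (lst : List Int) (g : Int) :
    ∀ (fuel k i : Nat), findFlagAux lst g fuel k = some i →
      k ≤ i ∧ ∃ (h : i < lst.length), lst[i] < g - 10 := by
  intro fuel
  induction fuel with
  | zero => intro k i h; cases h
  | succ fuel ih =>
    intro k i h
    rw [findFlagAux] at h
    by_cases hlt : k < lst.length
    · rw [dif_pos hlt] at h
      by_cases hx : lst[k] < g - 10
      · rw [if_pos hx] at h; cases h; exact ⟨le_refl _, hlt, hx⟩
      · rw [if_neg hx] at h
        obtain ⟨h1, h2⟩ := ih (k + 1) i h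
        exact ⟨by omega, h2⟩
    · rw [dif_neg hlt] at h; cases h

-- the fuel is irrelevant once it covers the remaining indices
theorem findIndexesAux_fuel_ext (lst : List Int) (g : Int) :
    ∀ (f1 f2 k : Nat), lst.length ≤ k + f1 → lst.length ≤ k + f2 →
      findIndexesAux lst g f1 k = findIndexesAux lst g f2 k := by
  intro f1
  induction f1 with
  | zero =>
    intro f2 k h1 h2
    cases f2 with
    | zero => rfl
    | succ f2 => rw [findIndexesAux, findIndexesAux, dif_neg (by omega)]
  | succ f1 ih =>
    intro f2 k h1 h2
    by_cases hlt : k < lst.length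
    · cases f2 with
      | zero => omega
      | succ f2 =>
        rw [findIndexesAux, findIndexesAux, dif_pos hlt, dif_pos hlt]
        by_cases hx : lst[k] > g
        · rw [if_pos hx, if_pos hx]
        · rw [if_neg hx, if_neg hx]
          exact ih f2 (k + 1) (by omega) (by omega)
    · cases f2 with
      | zero => rw [findIndexesAux, findIndexesAux, dif_neg hlt]
      | succ f2 => rw [findIndexesAux, findIndexesAux, dif_neg hlt, dif_neg hlt]

theorem findIndexesAux_cons (x : Int) (xs : List Int) (g : Int) :
    ∀ (fuel k : Nat),
      findIndexesAux (x :: xs) g fuel (k + 1) = (findIndexesAux xs g fuel k).map (· + 1) := by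
  intro fuel
  induction fuel with
  | zero => intro k; rfl
  | succ fuel ih =>
    intro k
    by_cases hlt : k < xs.length
    · rw [findIndexesAux, dif_pos (show k + 1 < (x :: xs).length by simp; omega)]
      simp only [List.getElem_cons_succ]
      conv_rhs => rw [findIndexesAux, dif_pos hlt]
      by_cases hx : xs[k] > g
      · rw [if_pos hx, if_pos hx]; rfl
      · rw [if_neg hx, if_neg hx]
        exact ih (k + 1)
    · rw [findIndexesAux, dif_neg (by simp; omega), findIndexesAux, dif_neg (by omega)]
      rfl

theorem findIndexesAux_drop (g : Int) :
    ∀ (m : Nat) (lst : List Int) (fuel : Nat),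
      findIndexesAux lst g fuel m = (findIndexesAux (lst.drop m) g fuel 0).map (fun i => m + i) := by
  intro m
  induction m with
  | zero =>
    intro lst fuel
    simp only [List.drop_zero, Nat.zero_add, Option.map_id']
  | succ m ih =>
    intro lst fuel
    cases lst with
    | nil =>
      cases fuel with
      | zero => rfl
      | succ fuel => rw [findIndexesAux, dif_neg (by simp)]; rfl
    | cons x xs =>
      rw [findIndexesAux_cons x xs g fuel m, ih xs fuel, List.drop_succ_cons, Option.map_map]
      congr 1
      funext i
      simp only [Function.comp_apply]
      omega

-- scanning for the next rise is invisible to the machine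
theorem mach_seek_true (lst : List Int) (g : Int) :
    ∀ (fuel k : Nat), lst.length ≤ k + fuel →
      mach g (lst.drop k) (k : Int) true =
        (match findIndexesAux lst g fuel k with
         | none => []
         | some i => mach g (lst.drop i) (i : Int) true) := by
  intro fuel
  induction fuel with
  | zero =>
    intro k hk
    rw [List.drop_eq_nil_of_le (by omega)]
    rfl
  | succ fuel ih =>
    intro k hk
    by_cases hlt : k < lst.length
    · rw [findIndexesAux, dif_pos hlt]
      by_cases hx : lst[k] > g
      · rw [if_pos hx]
      · rw [if_neg hx]
        rw [List.drop_eq_getElem_cons hlt]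
        simp only [mach, if_neg hx]
        rw [show ((k : Int) + 1) = ((k + 1 : Nat) : Int) by push_cast; ring]
        exact ih (k + 1) (by omega)
    · rw [findIndexesAux, dif_neg hlt, List.drop_eq_nil_of_le (by omega)]
      rfl

theorem mach_seek_false (lst : List Int) (g : Int) :
    ∀ (fuel k : Nat), lst.length ≤ k + fuel →
      mach g (lst.drop k) (k : Int) false =
        (match findFlagAux lst g fuel k with
         | none => []
         | some f => mach g (lst.drop f) (f : Int) false) := by
  intro fuel
  induction fuel with
  | zero =>
    intro k hk
    rw [List.drop_eq_nil_of_le (by omega)]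
    rfl
  | succ fuel ih =>
    intro k hk
    by_cases hlt : k < lst.length
    · rw [findFlagAux, dif_pos hlt]
      by_cases hx : lst[k] < g - 10
      · rw [if_pos hx]
      · rw [if_neg hx]
        rw [List.drop_eq_getElem_cons hlt]
        simp only [mach, if_neg hx]
        rw [show ((k : Int) + 1) = ((k + 1 : Nat) : Int) by push_cast; ring]
        exact ih (k + 1) (by omega)
    · rw [findFlagAux, dif_neg hlt, List.drop_eq_nil_of_le (by omega)]
      rfl

-- the main bridge: A's outer loop, started at a rise, equals the machine
theorem outerLoopA_eq_mach (lst : List Int) (g : Int) :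
    ∀ (n i : Nat), lst.length ≤ i + n → (h : i < lst.length) → lst[i] > g →
      outerLoopA lst g n i = mach g (lst.drop i) (i : Int) true := by
  intro n
  induction n with
  | zero => intro i hn hi hx; omega
  | succ n ih =>
    intro i hn hi hx
    rw [outerLoopA]
    rw [List.drop_eq_getElem_cons hi]
    simp only [mach, if_pos hx]
    congr 1
    rw [show ((i : Int) + 1) = ((i + 1 : Nat) : Int) by push_cast; ring]
    rw [mach_seek_false lst g lst.length (i + 1) (by omega)]
    unfold find_flag_index
    cases hf : findFlagAux lst g lst.length (i + 1) with
    | none => rfl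
    | some f =>
      dsimp only
      obtain ⟨hf1, hflt, hfx⟩ := findFlagAux_some lst g lst.length (i + 1) f hf
      rw [List.drop_eq_getElem_cons hflt]
      simp only [mach, if_pos hfx]
      rw [show ((f : Int) + 1) = ((f + 1 : Nat) : Int) by push_cast; ring]
      rw [mach_seek_true lst g (lst.length - (f + 1)) (f + 1) (by omega)]
      rw [findIndexesAux_drop g (f + 1) lst (lst.length - (f + 1))]
      unfold find_indexes
      rw [findIndexesAux_fuel_ext (lst.drop (f + 1)) g (lst.drop (f + 1)).length
        (lst.length - (f + 1)) 0 (by simp) (by simp)]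
      cases ho : findIndexesAux (lst.drop (f + 1)) g (lst.length - (f + 1)) 0 with
      | none => rfl
      | some i2 =>
        dsimp only
        simp only [Option.map_some]
        obtain ⟨-, hi2lt, hi2x⟩ := findIndexesAux_some (lst.drop (f + 1)) g
          (lst.length - (f + 1)) 0 i2 ho
        have hjlt : f + 1 + i2 < lst.length := by
          have := hi2lt; simp only [List.length_drop] at this; omega
        have hjx : lst[f + 1 + i2]'hjlt > g := by
          have := hi2x
          rwa [List.getElem_drop] at this
        have hrw : i2 + f + 1 = f + 1 + i2 := by omega
        rw [hrw]
        exact ih (f + 1 + i2) (by omega) hjlt hjx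

-- ===== VERDICT (by name: the statement is the Claim_ definition above) =====
theorem find_indexes_repeated_spec : Claim_equal_find_indexes_repeated := by
  intro lst ground _
  unfold Spec_find_indexes_repeated
  have hB := foldB_eq_mach ground lst 0 [] true
  unfold find_indexes_repeated
  unfold find_indexes_repeated_alt
  rw [hB]
  simp only [List.nil_append]
  have hseek := mach_seek_true lst ground lst.length 0 (by omega)
  simp only [List.drop_zero, Nat.cast_zero] at hseek
  unfold find_indexes
  cases h0 : findIndexesAux lst ground lst.length 0 with
  | none => simp only [h0] at hseek; exact hseek.symm
  | some i =>
    simp only [h0] at hseek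
    obtain ⟨-, hilt, hix⟩ := findIndexesAux_some lst ground lst.length 0 i h0
    dsimp only
    rw [outerLoopA_eq_mach lst ground lst.length i (by omega) hilt hix]
    exact hseek.symm
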